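-- pv_equiv track=rewrite | github.com/kanishk1602/SpikeAI | ga4_client.py | validate_fields_against_metadata
-- ===== SOURCE A (Python) =====
-- def validate_fields_against_metadata(
--     requested_metrics: list[str],
--     requested_dimensions: list[str],
--     metadata: dict,
-- ) -> tuple[list[str], list[str], dict]:
--     avail_metrics = set(metadata.get("metrics", []))
--     avail_dims = set(metadata.get("dimensions", []))
--
--     valid_metrics = [m for m in requested_metrics if m in avail_metrics]
--     valid_dims = [d for d in requested_dimensions if d in avail_dims]
--
--     notes = {}
--     invalid_m = [m for m in requested_metrics if m not in avail_metrics]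
--     invalid_d = [d for d in requested_dimensions if d not in avail_dims]
--     if invalid_m:
--         notes["invalidMetrics"] = invalid_m
--     if invalid_d:
--         notes["invalidDimensions"] = invalid_d
--
--     return valid_metrics, valid_dims, notes
-- ===== SOURCE B (Python) =====
-- def validate_fields_against_metadata(
--     requested_metrics: list[str],
--     requested_dimensions: list[str],
--     metadata: dict,
-- ) -> tuple[list[str], list[str], dict]:
--     # Sorted arrays + hand-written binary search instead of hash sets.
--     sorted_metrics = sorted(metadata.get("metrics", []))
--     sorted_dims = sorted(metadata.get("dimensions", []))
--
--     def found(arr, x):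
--         lo, hi = 0, len(arr)
--         while lo < hi:
--             mid = (lo + hi) // 2
--             if arr[mid] < x:
--                 lo = mid + 1
--             elif x < arr[mid]:
--                 hi = mid
--             else:
--                 return True
--         return False
--
--     valid_metrics, invalid_m = [], []
--     for m in requested_metrics:
--         if found(sorted_metrics, m):
--             valid_metrics.append(m)
--         else:
--             invalid_m.append(m)
--
--     valid_dims, invalid_d = [], []
--     for d in requested_dimensions:
--         if found(sorted_dims, d):
--             valid_dims.append(d)
--         else:
--             invalid_d.append(d)
--
--     notes = {}
--     if invalid_m:
--         notes["invalidMetrics"] = invalid_m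
--     if invalid_d:
--         notes["invalidDimensions"] = invalid_d
--     return valid_metrics, valid_dims, notes
-- ===== Notes on version B (the rewrite author's own statement) =====
-- stated objective: alternative
-- what changed: Replaces hash-set membership and four filter comprehensions with sorted availability arrays queried by a hand-written binary search, classifying each requested field in a single partitioning pass per list.
import Mathlib
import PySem

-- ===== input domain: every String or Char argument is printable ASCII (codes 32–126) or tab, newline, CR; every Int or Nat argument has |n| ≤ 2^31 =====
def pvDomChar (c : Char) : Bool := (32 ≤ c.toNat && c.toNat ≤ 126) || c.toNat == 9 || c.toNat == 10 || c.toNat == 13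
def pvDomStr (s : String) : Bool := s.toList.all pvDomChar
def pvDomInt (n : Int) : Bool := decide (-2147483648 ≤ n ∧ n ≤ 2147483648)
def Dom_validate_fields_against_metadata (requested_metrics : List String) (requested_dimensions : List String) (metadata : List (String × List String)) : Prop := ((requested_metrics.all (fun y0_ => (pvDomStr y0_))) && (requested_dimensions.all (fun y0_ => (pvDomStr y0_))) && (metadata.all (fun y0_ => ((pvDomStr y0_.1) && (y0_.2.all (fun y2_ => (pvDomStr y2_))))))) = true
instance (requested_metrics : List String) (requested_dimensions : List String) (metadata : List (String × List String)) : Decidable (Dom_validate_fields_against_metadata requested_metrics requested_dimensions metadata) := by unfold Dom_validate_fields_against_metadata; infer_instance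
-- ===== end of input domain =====

-- ===== PORT A =====
-- B replaces A's hash sets + four filter comprehensions by sorted arrays queried with a
-- hand-written binary search, one partitioning pass per list; alternative algorithm, same results.
def validate_fields_against_metadata (requested_metrics : List String) (requested_dimensions : List String) (metadata : List (String × List String)) : List String × List String × (List (String × List String)) :=
  let availM : PySem.Set String := PySem.Set.ofList (PySem.Dict.getD (PySem.Dict.mk metadata) "metrics" [])
  let availD : PySem.Set String := PySem.Set.ofList (PySem.Dict.getD (PySem.Dict.mk metadata) "dimensions" [])
  let validM := requested_metrics.filter (fun m => PySem.Set.contains availM m)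
  let validD := requested_dimensions.filter (fun d => PySem.Set.contains availD d)
  let notes : PySem.Dict String (List String) := PySem.Dict.empty
  let invalidM := requested_metrics.filter (fun m => !PySem.Set.contains availM m)
  let invalidD := requested_dimensions.filter (fun d => !PySem.Set.contains availD d)
  let notes := if invalidM ≠ [] then PySem.Dict.insert notes "invalidMetrics" invalidM else notes
  let notes := if invalidD ≠ [] then PySem.Dict.insert notes "invalidDimensions" invalidD else notes
  (validM, validD, notes.items)

-- ===== PORT B =====
-- binary search over a sorted availability array (Source B's `found`)
def pvFound (a : List String) (x : String) (lo hi : Nat) : Bool :=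
  if _h : lo < hi then
    let v := a.getD ((lo + hi) / 2) ""
    if v < x then pvFound a x ((lo + hi) / 2 + 1) hi
    else if x < v then pvFound a x lo ((lo + hi) / 2)
    else true
  else false
termination_by hi - lo
decreasing_by all_goals omega

def validate_fields_against_metadata_alt (requested_metrics : List String) (requested_dimensions : List String) (metadata : List (String × List String)) : List String × List String × (List (String × List String)) :=
  let sortedM := PySem.List.sorted (PySem.Dict.getD (PySem.Dict.mk metadata) "metrics" []) (fun x => x) false
  let sortedD := PySem.List.sorted (PySem.Dict.getD (PySem.Dict.mk metadata) "dimensions" []) (fun x => x) false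
  let pm := requested_metrics.foldl (fun acc m =>
    if pvFound sortedM m 0 sortedM.length then (acc.1 ++ [m], acc.2) else (acc.1, acc.2 ++ [m])) ([], [])
  let pd := requested_dimensions.foldl (fun acc d =>
    if pvFound sortedD d 0 sortedD.length then (acc.1 ++ [d], acc.2) else (acc.1, acc.2 ++ [d])) ([], [])
  let notes : PySem.Dict String (List String) := PySem.Dict.empty
  let notes := if pm.2 ≠ [] then PySem.Dict.insert notes "invalidMetrics" pm.2 else notes
  let notes := if pd.2 ≠ [] then PySem.Dict.insert notes "invalidDimensions" pd.2 else notes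
  (pm.1, pd.1, notes.items)

-- ===== PRECONDITION & SPEC =====
def Spec_validate_fields_against_metadata (requested_metrics : List String) (requested_dimensions : List String) (metadata : List (String × List String)) (out : List String × List String × (List (String × List String))) : Prop := out = validate_fields_against_metadata_alt requested_metrics requested_dimensions metadata
instance (requested_metrics : List String) (requested_dimensions : List String) (metadata : List (String × List String)) (out : List String × List String × (List (String × List String))) : Decidable (Spec_validate_fields_against_metadata requested_metrics requested_dimensions metadata out) := by unfold Spec_validate_fields_against_metadata; infer_instance

-- ===== CLAIM (what is proved, stated in full; the proofs are below) =====
def Claim_equal_validate_fields_against_metadata : Prop := ∀ (requested_metrics : List String) (requested_dimensions : List String) (metadata : List (String × List String)), Dom_validate_fields_against_metadata requested_metrics requested_dimensions metadata → Spec_validate_fields_against_metadata requested_metrics requested_dimensions metadata (validate_fields_against_metadata requested_metrics requested_dimensions metadata)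

-- ===== LEMMAS AND PROOFS =====

-- binary search on a (≤)-sorted list decides membership
lemma pvFound_correct (a : List String) (hs : a.Pairwise (· ≤ ·)) (x : String) :
    ∀ n lo hi, hi - lo ≤ n → hi ≤ a.length →
    (∀ i, i < lo → i < a.length → a.getD i "" < x) →
    (∀ i, hi ≤ i → i < a.length → x < a.getD i "") →
    (pvFound a x lo hi = true ↔ x ∈ a) := by
  have hmono : ∀ i j, i ≤ j → j < a.length → a.getD i "" ≤ a.getD j "" := by
    intro i j hij hj
    rcases Nat.eq_or_lt_of_le hij with rfl | hlt
    · exact le_refl _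
    · rw [List.getD_eq_getElem a "" (Nat.lt_of_le_of_lt hij hj), List.getD_eq_getElem a "" hj]
      exact (List.pairwise_iff_getElem.mp hs) i j _ _ hlt
  intro n
  induction n with
  | zero =>
    intro lo hi hn hhi hlow hhigh
    rw [pvFound]
    have : ¬ lo < hi := by omega
    simp only [this, dif_neg, not_false_iff]
    constructor
    · intro h; exact absurd h (by simp)
    · intro hmem
      rcases List.mem_iff_getElem.mp hmem with ⟨i, hi', hix⟩
      have hgi : a.getD i "" = x := by rw [List.getD_eq_getElem a "" hi']; exact hix
      by_cases hcase : i < lo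
      · exact absurd hgi (ne_of_lt (hlow i hcase hi'))
      · have : hi ≤ i := by omega
        exact absurd hgi (ne_of_gt (hhigh i this hi'))
  | succ n ih =>
    intro lo hi hn hhi hlow hhigh
    rw [pvFound]
    by_cases hlt : lo < hi
    · simp only [hlt, dif_pos]
      have hmid : (lo + hi) / 2 < hi := by omega
      have hmidlo : lo ≤ (lo + hi) / 2 := by omega
      have hmidlen : (lo + hi) / 2 < a.length := Nat.lt_of_lt_of_le hmid hhi
      set mid := (lo + hi) / 2 with hmiddef
      by_cases h1 : a.getD mid "" < x
      · simp only [h1, if_pos]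
        exact ih (mid + 1) hi (by omega) hhi
          (fun i hi1 hi2 => lt_of_le_of_lt (hmono i mid (by omega) hmidlen) h1)
          hhigh
      · simp only [h1, if_neg, not_false_iff]
        by_cases h2 : x < a.getD mid ""
        · simp only [h2, if_pos]
          exact ih lo mid (by omega) (by omega)
            hlow
            (fun i hi1 hi2 => lt_of_lt_of_le h2 (hmono mid i hi1 hi2))
        · simp only [h2, if_neg, not_false_iff]
          have hx : a.getD mid "" = x := le_antisymm (not_lt.mp h2) (not_lt.mp h1)
          simp only [true_iff]
          rw [List.getD_eq_getElem a "" hmidlen] at hx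
          exact hx ▸ List.getElem_mem hmidlen
    · simp only [hlt, dif_neg, not_false_iff]
      constructor
      · intro h; exact absurd h (by simp)
      · intro hmem
        rcases List.mem_iff_getElem.mp hmem with ⟨i, hi', hix⟩
        have hgi : a.getD i "" = x := by rw [List.getD_eq_getElem a "" hi']; exact hix
        by_cases hcase : i < lo
        · exact absurd hgi (ne_of_lt (hlow i hcase hi'))
        · have : hi ≤ i := by omega
          exact absurd hgi (ne_of_gt (hhigh i this hi'))

-- top-level: binary search over sorted(l) computes `x in set(l)`
lemma pvFound_sorted (l : List String) (x : String) :
    pvFound (PySem.List.sorted l (fun y => y) false) x 0 (PySem.List.sorted l (fun y => y) false).length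
      = PySem.Set.contains (PySem.Set.ofList l) x := by
  have hs : (PySem.List.sorted l (fun y => y) false).Pairwise (· ≤ ·) := by
    simpa using PySem.List.sorted_pairwise l (fun y => y)
  have h := pvFound_correct (PySem.List.sorted l (fun y => y) false) hs x
    ((PySem.List.sorted l (fun y => y) false).length) 0
    ((PySem.List.sorted l (fun y => y) false).length)
    (by omega) (le_refl _) (by omega) (by omega)
  have hmem := PySem.List.mem_sorted l (fun y => y) false x
  by_cases hx : x ∈ l
  · have ht : pvFound (PySem.List.sorted l (fun y => y) false) x 0
        (PySem.List.sorted l (fun y => y) false).length = true := h.mpr (hmem.mpr hx)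
    rw [ht]
    simp [pysem, hx]
  · have hf : pvFound (PySem.List.sorted l (fun y => y) false) x 0
        (PySem.List.sorted l (fun y => y) false).length = false := by
      cases hres : pvFound (PySem.List.sorted l (fun y => y) false) x 0
          (PySem.List.sorted l (fun y => y) false).length
      · rfl
      · exact absurd (hmem.mp (h.mp hres)) hx
    rw [hf]
    simp [pysem, hx]

-- B's partitioning fold, characterised by the two filters
lemma pvPartition_go (p : String → Bool) (xs : List String) (v i : List String) :
    xs.foldl (fun acc x =>
      if p x then (acc.1 ++ [x], acc.2) else (acc.1, acc.2 ++ [x])) (v, i)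
    = (v ++ xs.filter p, i ++ xs.filter (fun x => !p x)) := by
  induction xs generalizing v i with
  | nil => simp
  | cons x xs ih =>
    rw [List.foldl_cons]
    by_cases h : p x = true
    · rw [if_pos h, ih, List.filter_cons, List.filter_cons]
      simp [h]
    · rw [if_neg h, ih, List.filter_cons, List.filter_cons]
      simp only [Bool.not_eq_true] at h
      simp [h]

-- ===== VERDICT (by name: the statement is the Claim_ definition above) =====
theorem validate_fields_against_metadata_spec : Claim_equal_validate_fields_against_metadata := by
  intro rm rd md _
  simp only [Spec_validate_fields_against_metadata, validate_fields_against_metadata,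
    validate_fields_against_metadata_alt, pvFound_sorted, pvPartition_go, List.nil_append]
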